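-- pv_equiv track=rewrite | github.com/nishanthCACS/Cancer-protein-functional-detection | PDB_Gene_Mapping/Intiated_python_files/probabilty_weigtht_intialize_gene_from_PDB_seq_length_method_3.py | start_sorted_pdb_idex_group
-- ===== SOURCE A (Python) =====
-- import copy
--
-- def unique_element(mylist):
--     """
--     This function gave the unique element as in the order given in the mylist
--     """
--     used = set()
--     unique = [x for x in mylist if x not in used and (used.add(x) or True)]
--     return copy.deepcopy(unique)
--
-- def start_sorted_pdb_idex_group(start_end_position_t):
--     """
--     This function only useful for Method_2 and Method_3
--
--     This function find the unique start end positions and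
--     then sort the starting position in ascending order
--
--     pdb_ids_matched_with_unique: list of unique_group_idexes
--     avail_start                : available start positions from the unique sequence covered
--     sort_start_positions_index : sorted start position indexes of avail_start or  pdb_ids_matched_with_unique
--     avail_end                  : available end positions from the unique sequence covered
--
--     """
--     start_only = []
--     end_only = []
--     for s_e in start_end_position_t:
--         start_only.append(s_e[0])
--         end_only.append(s_e[1])
--     # then find the unique elements in the given start and end list to find the
--     # same kind of PDB_ids covering the sequence
--     unique_start = unique_element(start_only)
--     unique_end = unique_element(end_only)
--     # by using the unique lists find the similar PDB_ids with their idexes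
--     pdb_ids_matched_with_unique = []
--
--     for i in range(0,len(unique_start)):
--         for k in range(0,len(unique_end)):
--             chk = []
--             for j in range(0,len(start_only)):
--                 if unique_start[i] ==  start_only[j]:
--                     if unique_end[k] == end_only[j]:
--                         chk.append(j)
--             if len(chk)>0:
--                 pdb_ids_matched_with_unique.append(chk)
--     # checking purpose
--     #c=0
--     #for i in pdb_ids_matched_with_unique:
--     #    c=c+len(i)
--
--     avail_start = []
--     avail_end = []
--     for n in pdb_ids_matched_with_unique:
--         avail_start.append(start_end_position_t[n[0]][0])
--         avail_end.append(start_end_position_t[n[0]][1])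
--
--     # then sort the available start positions
--     """
--     sort_start_positions_index
--                                 specify  group_of_PDB has same sequence overlap
--                                 (the indexes of "pdb_ids_matched_with_unique")
--
--     "pdb_ids_matched_with_unique" itself contain the indexes of fin_PDB_ids selected Gene's index's PDB_ids
--                                                                                                 or
--     start_end_position_t
--     """
--     sort_start_positions_index =  [m[0] for m in sorted(enumerate(avail_start), key=lambda x:x[1])]
--
--     return pdb_ids_matched_with_unique, avail_start, sort_start_positions_index, avail_end
-- ===== SOURCE B (Python) =====
-- def start_sorted_pdb_idex_group(start_end_position_t):
--     # one pass: group indices by their (start, end) pair; remember first-appearance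
--     # rank of each start and of each end value
--     groups = {}
--     s_rank = {}
--     e_rank = {}
--     for j, (s, e) in enumerate(start_end_position_t):
--         if s not in s_rank:
--             s_rank[s] = len(s_rank)
--         if e not in e_rank:
--             e_rank[e] = len(e_rank)
--         groups.setdefault((s, e), []).append(j)
--     # order the groups the way A's double scan over the unique lists emits them:
--     # by first-appearance rank of the start, then of the end
--     ordered_keys = sorted(groups, key=lambda se: (s_rank[se[0]], e_rank[se[1]]))
--     pdb_ids_matched_with_unique = [groups[k] for k in ordered_keys]
--     avail_start = [k[0] for k in ordered_keys]
--     avail_end = [k[1] for k in ordered_keys]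
--     sort_start_positions_index = [m[0] for m in sorted(enumerate(avail_start), key=lambda x: x[1])]
--     return pdb_ids_matched_with_unique, avail_start, sort_start_positions_index, avail_end
-- ===== Notes on version B (the rewrite author's own statement) =====
-- stated objective: faster
-- what changed: replaces A's triple nested scan (every unique start x every unique end x full list) by a single pass that groups indices in a dict keyed by the (start,end) pair while recording first-appearance ranks of starts and ends, then sorts the group keys once by those ranks
import Mathlib
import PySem

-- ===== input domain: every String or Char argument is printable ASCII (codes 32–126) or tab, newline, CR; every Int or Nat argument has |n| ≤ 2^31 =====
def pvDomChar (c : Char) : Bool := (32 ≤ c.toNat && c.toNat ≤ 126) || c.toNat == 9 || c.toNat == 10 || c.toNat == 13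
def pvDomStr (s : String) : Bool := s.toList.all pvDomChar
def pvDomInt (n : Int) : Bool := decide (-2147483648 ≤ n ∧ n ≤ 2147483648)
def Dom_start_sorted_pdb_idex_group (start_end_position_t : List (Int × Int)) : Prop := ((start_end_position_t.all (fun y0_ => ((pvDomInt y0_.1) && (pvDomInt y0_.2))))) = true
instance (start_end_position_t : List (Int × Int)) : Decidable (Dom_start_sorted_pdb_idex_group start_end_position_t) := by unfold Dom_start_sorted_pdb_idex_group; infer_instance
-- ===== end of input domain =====

-- B replaces A's triple nested scan (unique starts × unique ends × whole list) by one
-- grouping pass over the list plus a single sort of the group keys by first-appearance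
-- ranks (objective: faster).

-- ===== PORT A =====
def unique_element (mylist : List Int) : List Int :=
  -- used = set(); unique = [x for x in mylist if x not in used and (used.add(x) or True)]
  let p := mylist.foldl
    (fun (p : PySem.Set Int × List Int) x =>
      if PySem.Set.contains p.1 x then p else (PySem.Set.add p.1 x, p.2 ++ [x]))
    (PySem.Set.empty, [])
  -- copy.deepcopy of a list of ints returns an equal list
  p.2

def start_sorted_pdb_idex_group (start_end_position_t : List (Int × Int)) : List (List Int) × List Int × List Int × List Int :=
  let se := start_end_position_t.foldl
    (fun (p : List Int × List Int) s_e => (p.1 ++ [s_e.1], p.2 ++ [s_e.2])) ([], [])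
  let start_only := se.1
  let end_only := se.2
  let unique_start := unique_element start_only
  let unique_end := unique_element end_only
  let pdb_ids_matched_with_unique :=
    (PySem.List.pyRange 0 (PySem.List.len unique_start)).foldl (fun acc i =>
      (PySem.List.pyRange 0 (PySem.List.len unique_end)).foldl (fun acc k =>
        let chk := (PySem.List.pyRange 0 (PySem.List.len start_only)).foldl (fun chk j =>
          if PySem.List.pyGetD unique_start i 0 = PySem.List.pyGetD start_only j 0 then
            if PySem.List.pyGetD unique_end k 0 = PySem.List.pyGetD end_only j 0 then
              chk ++ [j]
            else chk
          else chk) []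
        if PySem.List.len chk > 0 then acc ++ [chk] else acc) acc) []
  let av := pdb_ids_matched_with_unique.foldl
    (fun (p : List Int × List Int) n =>
      (p.1 ++ [(PySem.List.pyGetD start_end_position_t (PySem.List.pyGetD n 0 0) (0, 0)).1],
       p.2 ++ [(PySem.List.pyGetD start_end_position_t (PySem.List.pyGetD n 0 0) (0, 0)).2]))
    ([], [])
  let avail_start := av.1
  let avail_end := av.2
  let sort_start_positions_index :=
    (PySem.List.sorted (PySem.List.enumerate avail_start) (fun x => x.2)).map (fun m => m.1)
  (pdb_ids_matched_with_unique, avail_start, sort_start_positions_index, avail_end)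

-- ===== PORT B =====
def start_sorted_pdb_idex_group_alt (start_end_position_t : List (Int × Int)) : List (List Int) × List Int × List Int × List Int :=
  -- one pass: groups, s_rank, e_rank
  let st := (PySem.List.enumerate start_end_position_t).foldl
    (fun (p : PySem.Dict (Int × Int) (List Int) × PySem.Dict Int Int × PySem.Dict Int Int) je =>
      (p.1.modify je.2 [] (fun g => g ++ [je.1]),
        (if p.2.1.contains je.2.1 then p.2.1 else p.2.1.insert je.2.1 (p.2.1.size : Int),
         if p.2.2.contains je.2.2 then p.2.2 else p.2.2.insert je.2.2 (p.2.2.size : Int))))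
    (PySem.Dict.empty, PySem.Dict.empty, PySem.Dict.empty)
  let groups := st.1
  let s_rank := st.2.1
  let e_rank := st.2.2
  let ordered_keys := PySem.List.sorted2 groups.keys
      (fun se => s_rank.getD se.1 0) (fun se => e_rank.getD se.2 0)
  -- groups[k]: every ordered key is a key of groups, so the lookup is its getD
  let pdb_ids_matched_with_unique := ordered_keys.map (fun k => groups.getD k [])
  let avail_start := ordered_keys.map (fun k => k.1)
  let avail_end := ordered_keys.map (fun k => k.2)
  let sort_start_positions_index :=
    (PySem.List.sorted (PySem.List.enumerate avail_start) (fun x => x.2)).map (fun m => m.1)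
  (pdb_ids_matched_with_unique, avail_start, sort_start_positions_index, avail_end)

-- ===== PRECONDITION & SPEC =====
def Spec_start_sorted_pdb_idex_group (start_end_position_t : List (Int × Int)) (out : List (List Int) × List Int × List Int × List Int) : Prop := out = start_sorted_pdb_idex_group_alt start_end_position_t
instance (start_end_position_t : List (Int × Int)) (out : List (List Int) × List Int × List Int × List Int) : Decidable (Spec_start_sorted_pdb_idex_group start_end_position_t out) := by unfold Spec_start_sorted_pdb_idex_group; infer_instance

-- ===== CLAIM (what is proved, stated in full; the proofs are below) =====
def Claim_equal_start_sorted_pdb_idex_group : Prop := ∀ (start_end_position_t : List (Int × Int)), Dom_start_sorted_pdb_idex_group start_end_position_t → Spec_start_sorted_pdb_idex_group start_end_position_t (start_sorted_pdb_idex_group start_end_position_t)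

-- ===== LEMMAS AND PROOFS =====

def grpP (t : List (Int × Int)) (c : Int × Int) : List Int :=
  ((PySem.List.enumerate t).filter (fun je => je.2 == c)).map (fun je => je.1)

lemma ue_aux (xs : List Int) : ∀ (s : PySem.Set Int),
    xs.foldl (fun (p : PySem.Set Int × List Int) x =>
      if PySem.Set.contains p.1 x then p else (PySem.Set.add p.1 x, p.2 ++ [x])) (s, s)
    = (xs.foldl PySem.Set.add s, xs.foldl PySem.Set.add s) := by
  induction xs with
  | nil => intro s; rfl
  | cons x xs ih =>
    intro s
    simp only [List.foldl_cons]
    by_cases h : PySem.Set.contains s x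
    · have ha : PySem.Set.add s x = s := by simp only [PySem.Set.add]; rw [if_pos h]
      rw [if_pos h, ha]; exact ih s
    · have ha : PySem.Set.add s x = s ++ [x] := by simp only [PySem.Set.add]; rw [if_neg h]
      rw [if_neg h, ha]; exact ih (s ++ [x])

lemma grpP_pyRange (t : List (Int × Int)) (c : Int × Int) :
    grpP t c = (PySem.List.pyRange 0 (PySem.List.len t)).filter
      (fun j => PySem.List.pyGetD t j (0, 0) == c) := by
  rw [grpP, PySem.List.enumerate_eq_map_pyRange t (0, 0), List.filter_map, List.map_map]
  simp [Function.comp_def]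

lemma grpP_ne_nil_iff (t : List (Int × Int)) (c : Int × Int) : grpP t c ≠ [] ↔ c ∈ t := by
  have h := PySem.List.map_snd_enumerate t 0
  simp only [grpP, ne_eq, List.map_eq_nil_iff]
  rw [List.filter_eq_nil_iff]
  push_neg
  simp only [beq_iff_eq]
  constructor
  · rintro ⟨a, ha, h2⟩; rw [← h2, ← h]; exact List.mem_map_of_mem ha
  · intro hc; rw [← h] at hc; rcases List.mem_map.mp hc with ⟨je, hje, h2⟩; exact ⟨je, hje, h2⟩

lemma grpP_first (t : List (Int × Int)) (c : Int × Int) (hc : c ∈ t) :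
    PySem.List.pyGetD t (PySem.List.pyGetD (grpP t c) 0 0) (0, 0) = c := by
  have hne : grpP t c ≠ [] := (grpP_ne_nil_iff t c).mpr hc
  rw [grpP] at hne ⊢
  rcases hf : (PySem.List.enumerate t).filter (fun je => je.2 == c) with _ | ⟨fe, rest⟩
  · rw [hf] at hne; simp at hne
  · have hfe : fe ∈ (PySem.List.enumerate t).filter (fun je => je.2 == c) := by
      rw [hf]; exact List.mem_cons_self
    have h1 : fe ∈ PySem.List.enumerate t := (List.mem_filter.mp hfe).1
    have h2 : fe.2 = c := by simpa using (List.mem_filter.mp hfe).2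
    rcases (PySem.List.mem_enumerate_iff t 0 fe).mp h1 with ⟨k, hk, hfeq⟩
    rw [hf]
    simp only [List.map_cons, PySem.List.pyGetD_zero_cons]
    rw [hfeq] at h2 ⊢
    simp only [zero_add, PySem.List.pyGetD_natCast]
    simp [List.getD_eq_getElem?_getD, List.getElem?_eq_getElem hk]
    exact h2


def keyPairs (t : List (Int × Int)) : List (Int × Int) :=
  (PySem.Set.ofList (t.map (fun q => q.1))).flatMap (fun s =>
    ((PySem.Set.ofList (t.map (fun q => q.2))).filter
        (fun e => decide (grpP t (s, e) ≠ []))).map (fun e => (s, e)))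

lemma mem_keyPairs (t : List (Int × Int)) (c : Int × Int) : c ∈ keyPairs t ↔ c ∈ t := by
  simp only [keyPairs, List.mem_flatMap, List.mem_map, List.mem_filter,
    PySem.Set.mem_ofList, decide_eq_true_eq, grpP_ne_nil_iff]
  constructor
  · rintro ⟨s, hs, e, ⟨he, hmem⟩, rfl⟩; exact hmem
  · intro hc
    refine ⟨c.1, ⟨c, hc, rfl⟩, c.2, ⟨⟨c, hc, rfl⟩, by simpa using hc⟩, rfl⟩

lemma nodup_keyPairs (t : List (Int × Int)) : (keyPairs t).Nodup := by
  rw [keyPairs, List.nodup_flatMap]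
  constructor
  · intro s _
    exact (((PySem.Set.nodup_ofList _).filter _).map (fun e₁ e₂ h => by simpa using h))
  · have hnd := PySem.Set.nodup_ofList (t.map (fun q => q.1))
    refine hnd.imp_of_mem ?_
    intro a b _ _ hab
    rw [Function.onFun, List.disjoint_left]
    rintro x hx hx'
    rcases List.mem_map.mp hx with ⟨e, _, rfl⟩
    rcases List.mem_map.mp hx' with ⟨e', _, he'⟩
    exact hab (congrArg Prod.fst he').symm

lemma nodup_pairwise_idxOf {u : List Int} (hu : u.Nodup) :
    u.Pairwise (fun a b => u.idxOf a < u.idxOf b) := by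
  rw [List.pairwise_iff_getElem]
  intro i j hi hj hij
  rw [hu.idxOf_getElem i hi, hu.idxOf_getElem j hj]
  exact hij

lemma pairwise_flatMap_blocks {α β : Type} (R : β → β → Prop) (u : List α) (blk : α → List β)
    (hblk : ∀ a ∈ u, (blk a).Pairwise R)
    (hcross : u.Pairwise (fun a a' => ∀ x ∈ blk a, ∀ y ∈ blk a', R x y)) :
    (u.flatMap blk).Pairwise R := by
  induction u with
  | nil => simp
  | cons a u ih =>
    rw [List.flatMap_cons, List.pairwise_append]
    rcases List.pairwise_cons.mp hcross with ⟨hhead, htail⟩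
    refine ⟨hblk a List.mem_cons_self, ih (fun b hb => hblk b (List.mem_cons_of_mem a hb)) htail, ?_⟩
    intro x hx y hy
    rcases List.mem_flatMap.mp hy with ⟨b, hb, hyb⟩
    exact hhead b hb x hx y hyb

def rankD (xs : List Int) : PySem.Dict Int Int :=
  xs.foldl (fun d s => if d.contains s then d else d.insert s (d.size : Int)) PySem.Dict.empty

def groupsD (t : List (Int × Int)) : PySem.Dict (Int × Int) (List Int) :=
  (PySem.List.enumerate t).foldl (fun d je => d.modify je.2 [] (fun g => g ++ [je.1])) PySem.Dict.empty

lemma rank_aux (xs : List Int) : ∀ (d : PySem.Dict Int Int),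
    (∀ s ∈ d.keys, d.getD s 0 = (List.idxOf s d.keys : Int)) →
    (xs.foldl (fun d s => if d.contains s then d else d.insert s (d.size : Int)) d).keys
      = PySem.Set.update d.keys xs ∧
    ∀ s ∈ PySem.Set.update d.keys xs,
      (xs.foldl (fun d s => if d.contains s then d else d.insert s (d.size : Int)) d).getD s 0
        = (List.idxOf s (PySem.Set.update d.keys xs) : Int) := by
  induction xs with
  | nil => intro d hd; exact ⟨rfl, hd⟩
  | cons x xs ih =>
    intro d hd
    simp only [List.foldl_cons]
    have hupd : PySem.Set.update d.keys (x :: xs) = PySem.Set.update (PySem.Set.add d.keys x) xs := rfl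
    by_cases h : d.contains x
    · have hmem : x ∈ d.keys := (PySem.Dict.contains_iff_mem_keys d x).mp h
      have hk : PySem.Set.add d.keys x = d.keys := by
        simp only [PySem.Set.add]; rw [if_pos (by simpa using hmem)]
      rw [if_pos h, hupd, hk]
      exact ih d hd
    · have hnmem : x ∉ d.keys := fun hx => h ((PySem.Dict.contains_iff_mem_keys d x).mpr hx)
      have hk : PySem.Set.add d.keys x = d.keys ++ [x] := by
        simp only [PySem.Set.add]; rw [if_neg (by simpa using hnmem)]
      have hkeys : (d.insert x (d.size : Int)).keys = d.keys ++ [x] :=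
        PySem.Dict.keys_insert_of_not_contains d _ (by simpa using h)
      rw [if_neg h, hupd, hk, ← hkeys]
      apply ih
      intro s hs
      rw [hkeys] at hs
      rcases List.mem_append.mp hs with hs | hs
      · have hne : s ≠ x := fun he => hnmem (he ▸ hs)
        rw [PySem.Dict.getD_insert_of_ne d _ _ hne, hkeys, List.idxOf_append, if_pos hs]
        exact hd s hs
      · have hsx : s = x := by simpa using hs
        subst hsx
        rw [PySem.Dict.getD_insert_self, hkeys, List.idxOf_append, if_neg hnmem]
        simp [PySem.Dict.size, PySem.Dict.keys]

lemma rankD_spec (xs : List Int) :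
    (rankD xs).keys = PySem.Set.ofList xs ∧
    ∀ s ∈ PySem.Set.ofList xs, (rankD xs).getD s 0 = (List.idxOf s (PySem.Set.ofList xs) : Int) := by
  have h := rank_aux xs PySem.Dict.empty (by simp [PySem.Dict.keys_empty])
  have he : PySem.Set.update (PySem.Dict.empty : PySem.Dict Int Int).keys xs = PySem.Set.ofList xs := by
    rw [PySem.Set.ofList_eq_foldl]; simp [PySem.Set.update, PySem.Dict.keys_empty]
  rw [rankD]
  rw [he] at h
  exact h

lemma keys_groupsD (t : List (Int × Int)) : (groupsD t).keys = PySem.Set.ofList t := by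
  rw [groupsD, PySem.Dict.keys_foldl_modify_key (PySem.List.enumerate t) (fun je => je.2) []
    (fun _ je => fun g => g ++ [je.1]) PySem.Dict.empty]
  rw [PySem.List.map_snd_enumerate, PySem.Set.ofList_eq_foldl]
  simp [PySem.Set.update, PySem.Dict.keys_empty]

lemma getD_groupsD (t : List (Int × Int)) (c : Int × Int) : (groupsD t).getD c [] = grpP t c := by
  have hfold : (PySem.List.enumerate t).foldl
      (fun d je => d.modify je.2 [] (fun g => g ++ [je.1])) PySem.Dict.empty
      = ((PySem.List.enumerate t).map (fun je => (je.2, je.1))).foldl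
        (fun d p => d.modify p.1 [] (fun g => g ++ [p.2])) PySem.Dict.empty := by
    rw [List.foldl_map]
  rw [groupsD, hfold, PySem.Dict.getD_foldl_modify_append]
  simp [List.filter_map, List.map_map, Function.comp_def, grpP]

lemma sorted2_eq_sorted_lex {α : Type} (xs : List α) (k1 k2 : α → Int) :
    PySem.List.sorted2 xs k1 k2 = PySem.List.sorted xs (fun x => toLex (k1 x, k2 x)) := by
  rw [PySem.List.sorted_eq_foldl_insertBy]
  show xs.foldl (fun acc x => PySem.List.insertBy
      (fun a b => decide (k1 a < k1 b) || (!decide (k1 b < k1 a) && decide (k2 a < k2 b))) x acc) [] = _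
  have hc : (fun a b => decide (k1 a < k1 b) || (!decide (k1 b < k1 a) && decide (k2 a < k2 b)))
      = (fun a b => decide (toLex (k1 a, k2 a) < toLex (k1 b, k2 b))) := by
    funext a b
    by_cases h1 : k1 a < k1 b <;> by_cases h2 : k1 b < k1 a <;> by_cases h3 : k2 a < k2 b <;>
      simp [h1, h2, h3, Prod.Lex.lt_iff] <;> omega
  rw [hc]

lemma pairwise_idx_keyPairs (t : List (Int × Int)) :
    (keyPairs t).Pairwise (fun a b =>
      (PySem.Set.ofList (t.map (fun q => q.1))).idxOf a.1 < (PySem.Set.ofList (t.map (fun q => q.1))).idxOf b.1 ∨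
      (a.1 = b.1 ∧ (PySem.Set.ofList (t.map (fun q => q.2))).idxOf a.2 < (PySem.Set.ofList (t.map (fun q => q.2))).idxOf b.2)) := by
  rw [keyPairs]
  apply pairwise_flatMap_blocks
  · intro s hs
    rw [List.pairwise_map]
    have hue := nodup_pairwise_idxOf (PySem.Set.nodup_ofList (t.map (fun q => q.2)))
    have hflt := hue.sublist (List.filter_sublist (p := fun e => decide (grpP t (s, e) ≠ [])))
    exact hflt.imp (fun h => Or.inr ⟨rfl, h⟩)
  · have hus := nodup_pairwise_idxOf (PySem.Set.nodup_ofList (t.map (fun q => q.1)))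
    refine hus.imp ?_
    intro a b hab x hx y hy
    rcases List.mem_map.mp hx with ⟨e, _, rfl⟩
    rcases List.mem_map.mp hy with ⟨e', _, rfl⟩
    exact Or.inl (by simpa using hab)

lemma foldl_reindex {β : Type} (xs : List Int) (G : Int → List β) (d : Int) :
    (PySem.List.pyRange 0 (PySem.List.len xs)).foldl
      (fun acc i => acc ++ G (PySem.List.pyGetD xs i d)) [] = xs.flatMap G := by
  rw [PySem.List.foldl_append_eq_flatMap, List.nil_append]
  conv_rhs => rw [← PySem.List.map_pyGetD_pyRange_zero xs d]
  rw [List.flatMap_map]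

lemma filtermap_reindex {β : Type} (xs : List Int) (p : Int → Bool) (f : Int → β) (d : Int) :
    ((PySem.List.pyRange 0 (PySem.List.len xs)).filter (fun k => p (PySem.List.pyGetD xs k d))).map
      (fun k => f (PySem.List.pyGetD xs k d)) = (xs.filter p).map f := by
  conv_rhs => rw [← PySem.List.map_pyGetD_pyRange_zero xs d]
  rw [List.filter_map, List.map_map]
  rfl

lemma chkA_eq (t : List (Int × Int)) (s e : Int) :
    (PySem.List.pyRange 0 (PySem.List.len (t.map (fun q => q.1)))).foldl (fun chk j =>
      if s = PySem.List.pyGetD (t.map (fun q => q.1)) j 0 then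
        if e = PySem.List.pyGetD (t.map (fun q => q.2)) j 0 then chk ++ [j] else chk
      else chk) [] = grpP t (s, e) := by
  have hbody : (fun (chk : List Int) j =>
      if s = PySem.List.pyGetD (t.map (fun q => q.1)) j 0 then
        if e = PySem.List.pyGetD (t.map (fun q => q.2)) j 0 then chk ++ [j] else chk
      else chk) = (fun chk j =>
      if (s = PySem.List.pyGetD (t.map (fun q => q.1)) j 0 ∧
          e = PySem.List.pyGetD (t.map (fun q => q.2)) j 0) then chk ++ [j] else chk) := by
    funext chk j
    by_cases h1 : s = PySem.List.pyGetD (t.map (fun q => q.1)) j 0 <;>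
      by_cases h2 : e = PySem.List.pyGetD (t.map (fun q => q.2)) j 0 <;> simp [h1, h2]
  rw [hbody, PySem.List.foldl_append_ite_eq_filter, List.nil_append, grpP_pyRange]
  have hlen : PySem.List.len (t.map (fun q => q.1)) = PySem.List.len t := by
    simp [PySem.List.len_eq]
  rw [hlen]
  apply List.filter_congr
  intro j hj
  rcases PySem.List.mem_pyRange_one.mp hj with ⟨h0, hlt⟩
  have hlt0 : j < (t.length : Int) := by simpa [PySem.List.len_eq] using hlt
  rw [PySem.List.pyGetD_eq_getElem (t.map (fun q => q.1)) 0 h0 (by simpa using hlt0),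
    PySem.List.pyGetD_eq_getElem (t.map (fun q => q.2)) 0 h0 (by simpa using hlt0),
    PySem.List.pyGetD_eq_getElem t (0, 0) h0 hlt0]
  simp only [List.getElem_map]
  rw [Bool.eq_iff_iff]
  simp only [decide_eq_true_eq, beq_iff_eq, Prod.ext_iff]
  constructor
  · rintro ⟨h1, h2⟩; exact ⟨h1.symm, h2.symm⟩
  · rintro ⟨h1, h2⟩; exact ⟨h1.symm, h2.symm⟩

lemma midA_eq (t : List (Int × Int)) (s : Int) (acc : List (List Int)) :
    (PySem.List.pyRange 0 (PySem.List.len (PySem.Set.ofList (t.map (fun q => q.2))))).foldl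
      (fun acc k =>
        if PySem.List.len (grpP t (s, PySem.List.pyGetD (PySem.Set.ofList (t.map (fun q => q.2))) k 0)) > 0 then
          acc ++ [grpP t (s, PySem.List.pyGetD (PySem.Set.ofList (t.map (fun q => q.2))) k 0)]
        else acc) acc
    = acc ++ ((PySem.Set.ofList (t.map (fun q => q.2))).filter
        (fun e => decide (grpP t (s, e) ≠ []))).map (fun e => grpP t (s, e)) := by
  rw [PySem.List.foldl_append_ite (fun k =>
      PySem.List.len (grpP t (s, PySem.List.pyGetD (PySem.Set.ofList (t.map (fun q => q.2))) k 0)) > 0)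
    (fun k => grpP t (s, PySem.List.pyGetD (PySem.Set.ofList (t.map (fun q => q.2))) k 0))]
  congr 1
  rw [filtermap_reindex (PySem.Set.ofList (t.map (fun q => q.2)))
    (fun e => decide (PySem.List.len (grpP t (s, e)) > 0)) (fun e => grpP t (s, e)) 0]
  apply congrArg
  apply List.filter_congr
  intro e _
  rw [decide_eq_decide]
  simp [PySem.List.len_eq, List.length_pos_iff]

lemma unique_element_eq (xs : List Int) : unique_element xs = PySem.Set.ofList xs := by
  rw [unique_element, PySem.Set.ofList_eq_foldl]
  have := ue_aux xs PySem.Set.empty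
  simpa [PySem.Set.empty] using congrArg Prod.snd this

lemma A_norm (t : List (Int × Int)) :
    start_sorted_pdb_idex_group t =
      ((keyPairs t).map (grpP t), (keyPairs t).map (fun k => k.1),
       (PySem.List.sorted (PySem.List.enumerate ((keyPairs t).map (fun k => k.1))) (fun x => x.2)).map (fun m => m.1),
       (keyPairs t).map (fun k => k.2)) := by
  simp only [start_sorted_pdb_idex_group]
  rw [PySem.List.foldl_prod_mk (f := fun (l : List Int) (s_e : Int × Int) => l ++ [s_e.1])
    (g := fun (l : List Int) (s_e : Int × Int) => l ++ [s_e.2])]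
  simp only [PySem.List.foldl_append_singleton_eq_map, List.nil_append, unique_element_eq]
  simp only [chkA_eq]
  simp only [midA_eq]
  rw [foldl_reindex (PySem.Set.ofList (t.map (fun q => q.1)))
    (fun s => ((PySem.Set.ofList (t.map (fun q => q.2))).filter
        (fun e => decide (grpP t (s, e) ≠ []))).map (fun e => grpP t (s, e))) 0]
  have hpdb : (PySem.Set.ofList (t.map (fun q => q.1))).flatMap
      (fun s => ((PySem.Set.ofList (t.map (fun q => q.2))).filter
        (fun e => decide (grpP t (s, e) ≠ []))).map (fun e => grpP t (s, e)))
      = (keyPairs t).map (grpP t) := by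
    rw [keyPairs, List.map_flatMap]
    simp only [List.map_map, Function.comp_def]
  rw [hpdb]
  rw [PySem.List.foldl_prod_mk
    (f := fun (l : List Int) (n : List Int) => l ++ [(PySem.List.pyGetD t (PySem.List.pyGetD n 0 0) (0, 0)).1])
    (g := fun (l : List Int) (n : List Int) => l ++ [(PySem.List.pyGetD t (PySem.List.pyGetD n 0 0) (0, 0)).2])]
  simp only [PySem.List.foldl_append_singleton_eq_map, List.nil_append, List.map_map]
  have hav1 : (keyPairs t).map ((fun n => (PySem.List.pyGetD t (PySem.List.pyGetD n 0 0) (0, 0)).1) ∘ grpP t)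
      = (keyPairs t).map (fun k => k.1) := by
    apply List.map_congr_left
    intro k hk
    simp only [Function.comp_apply]
    rw [grpP_first t k ((mem_keyPairs t k).mp hk)]
  have hav2 : (keyPairs t).map ((fun n => (PySem.List.pyGetD t (PySem.List.pyGetD n 0 0) (0, 0)).2) ∘ grpP t)
      = (keyPairs t).map (fun k => k.2) := by
    apply List.map_congr_left
    intro k hk
    simp only [Function.comp_apply]
    rw [grpP_first t k ((mem_keyPairs t k).mp hk)]
  rw [hav1, hav2]

lemma B_norm (t : List (Int × Int)) :
    start_sorted_pdb_idex_group_alt t =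
      ((keyPairs t).map (grpP t), (keyPairs t).map (fun k => k.1),
       (PySem.List.sorted (PySem.List.enumerate ((keyPairs t).map (fun k => k.1))) (fun x => x.2)).map (fun m => m.1),
       (keyPairs t).map (fun k => k.2)) := by
  simp only [start_sorted_pdb_idex_group_alt]
  rw [PySem.List.foldl_prod_mk
    (f := fun (d : PySem.Dict (Int × Int) (List Int)) (je : Int × (Int × Int)) => d.modify je.2 [] (fun g => g ++ [je.1]))
    (g := fun (q : PySem.Dict Int Int × PySem.Dict Int Int) (je : Int × (Int × Int)) =>
      (if q.1.contains je.2.1 then q.1 else q.1.insert je.2.1 (q.1.size : Int),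
       if q.2.contains je.2.2 then q.2 else q.2.insert je.2.2 (q.2.size : Int)))]
  rw [PySem.List.foldl_prod_mk
    (f := fun (d : PySem.Dict Int Int) (je : Int × (Int × Int)) => if d.contains je.2.1 then d else d.insert je.2.1 (d.size : Int))
    (g := fun (d : PySem.Dict Int Int) (je : Int × (Int × Int)) => if d.contains je.2.2 then d else d.insert je.2.2 (d.size : Int))]
  have hg : List.foldl (fun (d : PySem.Dict (Int × Int) (List Int)) (je : Int × (Int × Int)) =>
      d.modify je.2 [] fun g => g ++ [je.1]) PySem.Dict.empty (PySem.List.enumerate t) = groupsD t := rfl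
  have hs1 : List.foldl (fun (d : PySem.Dict Int Int) (je : Int × (Int × Int)) =>
      if d.contains je.2.1 then d else d.insert je.2.1 (d.size : Int)) PySem.Dict.empty (PySem.List.enumerate t)
      = rankD (t.map (fun q => q.1)) := by
    rw [rankD]
    have hm : (t.map (fun q => q.1)) = (PySem.List.enumerate t).map (fun je => je.2.1) := by
      conv_lhs => rw [← PySem.List.map_snd_enumerate t 0]
      rw [List.map_map]
      rfl
    rw [hm, List.foldl_map]
  have hs2 : List.foldl (fun (d : PySem.Dict Int Int) (je : Int × (Int × Int)) =>
      if d.contains je.2.2 then d else d.insert je.2.2 (d.size : Int)) PySem.Dict.empty (PySem.List.enumerate t)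
      = rankD (t.map (fun q => q.2)) := by
    rw [rankD]
    have hm : (t.map (fun q => q.2)) = (PySem.List.enumerate t).map (fun je => je.2.2) := by
      conv_lhs => rw [← PySem.List.map_snd_enumerate t 0]
      rw [List.map_map]
      rfl
    rw [hm, List.foldl_map]
  rw [hg, hs1, hs2]
  dsimp only
  rw [keys_groupsD, sorted2_eq_sorted_lex]
  have hkeys : PySem.List.sorted (PySem.Set.ofList t)
      (fun se => toLex ((rankD (t.map (fun q => q.1))).getD se.1 0,
        (rankD (t.map (fun q => q.2))).getD se.2 0)) = keyPairs t := by
    apply PySem.List.sorted_eq_of_perm_of_pairwise_lt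
    · exact (List.perm_ext_iff_of_nodup (nodup_keyPairs t) (PySem.Set.nodup_ofList t)).mpr
        (fun a => by rw [mem_keyPairs, PySem.Set.mem_ofList])
    · refine (pairwise_idx_keyPairs t).imp_of_mem ?_
      intro a b ha hb hab
      have hat : a ∈ t := (mem_keyPairs t a).mp ha
      have hbt : b ∈ t := (mem_keyPairs t b).mp hb
      have ha1 : a.1 ∈ PySem.Set.ofList (t.map (fun q => q.1)) := by
        rw [PySem.Set.mem_ofList]; exact List.mem_map_of_mem hat
      have hb1 : b.1 ∈ PySem.Set.ofList (t.map (fun q => q.1)) := by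
        rw [PySem.Set.mem_ofList]; exact List.mem_map_of_mem hbt
      have ha2 : a.2 ∈ PySem.Set.ofList (t.map (fun q => q.2)) := by
        rw [PySem.Set.mem_ofList]; exact List.mem_map_of_mem hat
      have hb2 : b.2 ∈ PySem.Set.ofList (t.map (fun q => q.2)) := by
        rw [PySem.Set.mem_ofList]; exact List.mem_map_of_mem hbt
      have r1a := (rankD_spec (t.map (fun q => q.1))).2 a.1 ha1
      have r1b := (rankD_spec (t.map (fun q => q.1))).2 b.1 hb1
      have r2a := (rankD_spec (t.map (fun q => q.2))).2 a.2 ha2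
      have r2b := (rankD_spec (t.map (fun q => q.2))).2 b.2 hb2
      rw [Prod.Lex.lt_iff]
      rcases hab with h | ⟨heq, h⟩
      · left
        simp only [ofLex_toLex]
        rw [r1a, r1b]
        exact_mod_cast h
      · right
        constructor
        · simp only [ofLex_toLex]
          rw [r1a, r1b, heq]
        · simp only [ofLex_toLex]
          rw [r2a, r2b]
          exact_mod_cast h
  rw [hkeys]
  have hmapg : (keyPairs t).map (fun k => (groupsD t).getD k []) = (keyPairs t).map (grpP t) :=
    List.map_congr_left (fun k _ => getD_groupsD t k)
  rw [hmapg]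

-- ===== VERDICT (by name: the statement is the Claim_ definition above) =====
theorem start_sorted_pdb_idex_group_spec : Claim_equal_start_sorted_pdb_idex_group := by
  intro t _
  show _ = _
  rw [A_norm, B_norm]
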